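-- pv_equiv track=rewrite | github.com/Jinra0505/vot | assignment.py | _access_station_ids
-- ===== SOURCE A (Python) =====
-- from typing import Any, Dict, List, Tuple
--
-- def _access_station_ids(it: Dict[str, Any], t: int | None = None) -> List[str]:
--     access = it.get("access_stations", [])
--     out: List[str] = []
--     for st in access:
--         if t is not None and st.get("t") != t:
--             continue
--         sid = st.get("station")
--         if sid is not None:
--             out.append(str(sid))
--     if out:
--         return out
--     for st in access:
--         sid = st.get("station")
--         if sid is not None:
--             out.append(str(sid))
--     return out
-- ===== SOURCE B (Python) =====
-- from typing import Any, Dict, List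
--
-- def _access_station_ids(it: Dict[str, Any], t: int | None = None) -> List[str]:
--     filtered: List[str] = []
--     all_ids: List[str] = []
--     for st in it.get("access_stations", []):
--         sid = st.get("station")
--         if sid is None:
--             continue
--         s = str(sid)
--         all_ids.append(s)
--         if t is None or st.get("t") == t:
--             filtered.append(s)
--     return filtered if filtered else all_ids
-- ===== Notes on version B (the rewrite author's own statement) =====
-- stated objective: simpler
-- what changed: Single traversal maintaining both the filtered list and the fallback list at once, instead of a filtered pass followed by a conditional second full pass.
import Mathlib
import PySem

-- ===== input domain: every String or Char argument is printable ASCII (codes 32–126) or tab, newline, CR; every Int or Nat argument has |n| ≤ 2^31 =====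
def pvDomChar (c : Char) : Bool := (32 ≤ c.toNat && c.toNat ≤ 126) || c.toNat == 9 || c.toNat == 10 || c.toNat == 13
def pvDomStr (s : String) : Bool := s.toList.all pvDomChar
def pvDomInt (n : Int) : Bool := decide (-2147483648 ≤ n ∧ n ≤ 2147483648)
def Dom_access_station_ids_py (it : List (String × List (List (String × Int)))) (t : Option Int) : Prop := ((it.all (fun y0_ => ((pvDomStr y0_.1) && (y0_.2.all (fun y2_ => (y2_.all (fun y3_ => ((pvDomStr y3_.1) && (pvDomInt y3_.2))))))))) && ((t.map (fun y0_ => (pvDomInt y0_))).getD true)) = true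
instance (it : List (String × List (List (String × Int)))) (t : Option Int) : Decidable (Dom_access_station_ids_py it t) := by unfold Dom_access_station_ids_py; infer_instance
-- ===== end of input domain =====

-- B replaces A's filtered pass plus conditional second fallback pass by a single
-- traversal that maintains both lists at once (objective: simpler).

-- ===== PORT A =====
-- A's loop bodies as named step functions; A's two loops, each a foldl over the access list.
def pvStepFilter (t : Option Int) (out : List String) (st : List (String × Int)) : List String :=
  if t ≠ none ∧ (PySem.Dict.mk st).get? "t" ≠ t then out   -- 'continue'
  else match (PySem.Dict.mk st).get? "station" with
    | some sid => out ++ [PySem.Int.toStr sid]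
    | none => out

def pvStepAll (out : List String) (st : List (String × Int)) : List String :=
  match (PySem.Dict.mk st).get? "station" with
  | some sid => out ++ [PySem.Int.toStr sid]
  | none => out

def access_station_ids_py (it : List (String × List (List (String × Int)))) (t : Option Int) : List String :=
  let access := ((PySem.Dict.mk it).get? "access_stations").getD []
  let out : List String := access.foldl (pvStepFilter t) []
  if out ≠ [] then out
  else access.foldl pvStepAll out

-- ===== PORT B =====
-- one pass, pair accumulator (filtered, all_ids); the loop body as a named step function
def pvStepPair (t : Option Int) (acc : List String × List String) (st : List (String × Int)) :
    List String × List String :=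
  match (PySem.Dict.mk st).get? "station" with
  | none => acc
  | some sid =>
    let s := PySem.Int.toStr sid
    ((if t = none ∨ (PySem.Dict.mk st).get? "t" = t then acc.1 ++ [s] else acc.1),
     acc.2 ++ [s])

def access_station_ids_py_alt (it : List (String × List (List (String × Int)))) (t : Option Int) : List String :=
  let p := (((PySem.Dict.mk it).get? "access_stations").getD []).foldl (pvStepPair t) ([], [])
  if p.1 ≠ [] then p.1 else p.2

-- ===== PRECONDITION & SPEC =====
def Spec_access_station_ids_py (it : List (String × List (List (String × Int)))) (t : Option Int) (out : List String) : Prop := out = access_station_ids_py_alt it t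
instance (it : List (String × List (List (String × Int)))) (t : Option Int) (out : List String) : Decidable (Spec_access_station_ids_py it t out) := by unfold Spec_access_station_ids_py; infer_instance

-- ===== CLAIM (what is proved, stated in full; the proofs are below) =====
def Claim_equal_access_station_ids_py : Prop := ∀ (it : List (String × List (List (String × Int)))) (t : Option Int), Dom_access_station_ids_py it t → Spec_access_station_ids_py it t (access_station_ids_py it t)

-- ===== LEMMAS AND PROOFS =====

-- B's step equals A's two steps, componentwise.
theorem pv_step_pair (t : Option Int) (a b : List String) (st : List (String × Int)) :
    pvStepPair t (a, b) st = (pvStepFilter t a st, pvStepAll b st) := by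
  unfold pvStepPair pvStepFilter pvStepAll
  rcases h : (PySem.Dict.mk st).get? "station" with _ | sid
  · by_cases hc : t ≠ none ∧ (PySem.Dict.mk st).get? "t" ≠ t <;> simp [hc]
  · by_cases hc : t = none ∨ (PySem.Dict.mk st).get? "t" = t
    · have hc' : ¬ (t ≠ none ∧ (PySem.Dict.mk st).get? "t" ≠ t) := by tauto
      simp [hc, hc']
    · have hc' : t ≠ none ∧ (PySem.Dict.mk st).get? "t" ≠ t := by tauto
      simp [hc, hc']

-- B's paired fold computes exactly A's two folds, componentwise.
theorem pv_pair_fold (t : Option Int) (access : List (List (String × Int)))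
    (a b : List String) :
    access.foldl (pvStepPair t) (a, b)
      = (access.foldl (pvStepFilter t) a, access.foldl pvStepAll b) := by
  induction access generalizing a b with
  | nil => rfl
  | cons st rest ih => simp only [List.foldl_cons, pv_step_pair]; exact ih _ _

-- ===== VERDICT (by name: the statement is the Claim_ definition above) =====
theorem access_station_ids_py_spec : Claim_equal_access_station_ids_py := by
  intro it t _
  unfold Spec_access_station_ids_py access_station_ids_py access_station_ids_py_alt
  rw [pv_pair_fold]
  by_cases hf : (((PySem.Dict.mk it).get? "access_stations").getD []).foldl (pvStepFilter t) [] = []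
  · simp [hf]
  · simp [hf]
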